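-- pv_equiv track=rewrite | github.com/scottshepard/advent-of-code | 2020/day07.py | count_parents
-- ===== SOURCE A (Python) =====
-- def count_parents(tree, node):
--     parents = []
--     x = _count_parents(tree, [node])
--     while x != []:
--         x = list(set(x))
--         parents.extend(x)
--         parents = list(set(parents))
--         x = _count_parents(tree, x)
--     return len(list(set(parents)))
--
-- def _count_parents(tree, nodes):
--     new_nodes=[]
--     for k in tree:
--         #pdb.set_trace()
--         for n in nodes:
--             for bag in tree[k]:
--                 if n in bag:
--                     new_nodes.append(k)
--     return new_nodes
-- ===== SOURCE B (Python) =====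
-- def count_parents(tree, node):
--     keys = list(tree)
--     visited = set()
--     frontier = [node]
--     while frontier:
--         new = []
--         for n in frontier:
--             for k in keys:
--                 if k not in visited and any(n in bag for bag in tree[k]):
--                     visited.add(k)
--                     new.append(k)
--         frontier = new
--     return len(visited)
-- ===== Notes on version B (the rewrite author's own statement) =====
-- stated objective: alternative
-- what changed: A re-derives the whole parent frontier layer by layer (a node can re-enter the frontier in many layers, each rescanning all keys and bags); B does a breadth-first search with a visited set over the same substring-containment graph, so each node is expanded at most once; Pre_ excludes exactly the inputs where A's while loop never terminates (a substring cycle reachable from node) - A returns on all other inputs.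
import Mathlib
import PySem

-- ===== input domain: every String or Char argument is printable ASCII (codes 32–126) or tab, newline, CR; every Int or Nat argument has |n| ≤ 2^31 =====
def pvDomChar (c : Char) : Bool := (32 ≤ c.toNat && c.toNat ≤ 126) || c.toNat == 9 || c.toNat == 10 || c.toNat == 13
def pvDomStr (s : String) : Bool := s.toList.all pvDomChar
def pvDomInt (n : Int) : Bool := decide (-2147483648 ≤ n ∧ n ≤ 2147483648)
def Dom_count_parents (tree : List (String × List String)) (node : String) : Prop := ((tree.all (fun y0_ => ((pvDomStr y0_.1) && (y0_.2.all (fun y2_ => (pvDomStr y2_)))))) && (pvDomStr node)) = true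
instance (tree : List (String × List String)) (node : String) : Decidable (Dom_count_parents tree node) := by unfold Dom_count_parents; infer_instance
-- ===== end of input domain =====

-- B replaces A's layer-by-layer re-scanning (a node can re-enter the frontier in many
-- layers) by a breadth-first search with a visited set, so each bag key is expanded at
-- most once; objective: alternative (not measured faster).

-- ===== PORT A =====
-- '_count_parents(tree, nodes)': triple loop appending k for every (k, n, bag) with n in bag
def pcpUnder (d : PySem.Dict String (List String)) (nodes : List String) : List String :=
  (PySem.Dict.keys d).foldl (fun acc k =>
    nodes.foldl (fun acc n =>
      ((PySem.Dict.get? d k).getD []).foldl (fun acc bag =>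
        if PySem.Str.isIn n bag then acc ++ [k] else acc) acc) acc) []

-- A's 'while x != []' loop; fuel (keys+2) is a totality device only: under Pre_ the loop
-- exits by itself before the fuel runs out (proved below), and outside Pre_ A never returns.
def pcpLoopA (d : PySem.Dict String (List String)) : Nat → List String → List String → Int
  | 0, parents, _ => ((PySem.Set.ofList parents).length : Int)
  | fuel+1, parents, x =>
    if x = [] then ((PySem.Set.ofList parents).length : Int)
    else
      let x' := PySem.Set.ofList x
      let parents' := PySem.Set.ofList (parents ++ x')
      pcpLoopA d fuel parents' (pcpUnder d x')

def count_parents (tree : List (String × List String)) (node : String) : Int :=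
  let d := PySem.Dict.ofList tree
  pcpLoopA d ((PySem.Dict.keys d).length + 2) [] (pcpUnder d [node])

-- ===== PORT B =====
-- one frontier element n: scan keys, adding unvisited substring-parents to visited and new
def pcpExpand (d : PySem.Dict String (List String)) (keys : List String)
    (st : PySem.Set String × List String) (n : String) : PySem.Set String × List String :=
  keys.foldl (fun st k =>
    if !(PySem.Set.contains st.1 k) && ((PySem.Dict.get? d k).getD []).any (fun bag => PySem.Str.isIn n bag)
    then (PySem.Set.add st.1 k, st.2 ++ [k]) else st) st

-- B's 'while frontier' loop; fuel (keys+2) suffices on EVERY input (each round either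
-- grows visited or is the last), it is only a totality device.
def pcpLoopB (d : PySem.Dict String (List String)) (keys : List String) :
    Nat → PySem.Set String → List String → Int
  | 0, visited, _ => (visited.length : Int)
  | fuel+1, visited, frontier =>
    if frontier = [] then (visited.length : Int)
    else
      let st := frontier.foldl (pcpExpand d keys) (visited, [])
      pcpLoopB d keys fuel st.1 st.2

def count_parents_alt (tree : List (String × List String)) (node : String) : Int :=
  let d := PySem.Dict.ofList tree
  let keys := PySem.Dict.keys d
  pcpLoopB d keys (keys.length + 2) PySem.Set.empty [node]

-- ===== PRECONDITION & SPEC =====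
-- shared graph vocabulary for the precondition (independent of both ports):
-- 'pvEdge d n k' = bag key k directly contains n (n is a substring of one of k's bags)
def pvEdge (d : PySem.Dict String (List String)) (n k : String) : Bool :=
  ((PySem.Dict.get? d k).getD []).any (fun bag => PySem.Str.isIn n bag)

def pvPar (d : PySem.Dict String (List String)) (n : String) : Finset String :=
  ((PySem.Dict.keys d).filter (fun k => pvEdge d n k)).toFinset

def pvStepF (d : PySem.Dict String (List String)) (s : Finset String) : Finset String :=
  s.biUnion (pvPar d)

def pvLayer (d : PySem.Dict String (List String)) (a : String) : Nat → Finset String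
  | 0 => {a}
  | i+1 => pvStepF d (pvLayer d a i)

def pvAccum (d : PySem.Dict String (List String)) (a : String) : Nat → Finset String
  | 0 => ∅
  | i+1 => pvAccum d a i ∪ pvLayer d a (i+1)

-- Pre_ excludes exactly the inputs on which A's while loop never terminates (no value is
-- returned there): those where some key k lies on a substring-containment cycle and is
-- reachable from node.  'pvAccum d a K' (K = number of keys) is everything reachable from
-- a in at least one step; A returns on every other input.
def Pre_count_parents (tree : List (String × List String)) (node : String) : Prop :=
  ∀ k ∈ pvAccum (PySem.Dict.ofList tree) node (PySem.Dict.keys (PySem.Dict.ofList tree)).length,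
    k ∉ pvAccum (PySem.Dict.ofList tree) k (PySem.Dict.keys (PySem.Dict.ofList tree)).length

instance (tree : List (String × List String)) (node : String) : Decidable (Pre_count_parents tree node) := by
  unfold Pre_count_parents; infer_instance

def pvWitness_count_parents : (List (String × List String)) × String := ([("a", ["b"])], "b")

def Spec_count_parents (tree : List (String × List String)) (node : String) (out : Int) : Prop := out = count_parents_alt tree node
instance (tree : List (String × List String)) (node : String) (out : Int) : Decidable (Spec_count_parents tree node out) := by unfold Spec_count_parents; infer_instance

-- ===== CLAIM (what is proved, stated in full; the proofs are below) =====
def Claim_equal_count_parents : Prop := ∀ (tree : List (String × List String)) (node : String), Dom_count_parents tree node → Pre_count_parents tree node → Spec_count_parents tree node (count_parents tree node)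

-- ===== LEMMAS AND PROOFS =====

-- ==== basic set-as-list facts ====
theorem pvSet_ofList_toFinset (l : List String) : (PySem.Set.ofList l).toFinset = l.toFinset := by
  ext x; simp [PySem.Set.mem_ofList]

theorem pvSet_ofList_length (l : List String) : ((PySem.Set.ofList l).length : Int) = (l.toFinset.card : Int) := by
  have h1 : (PySem.Set.ofList l).toFinset.card = (PySem.Set.ofList l).length :=
    List.toFinset_card_of_nodup (PySem.Set.nodup_ofList l)
  rw [← pvSet_ofList_toFinset l, h1]

-- ==== membership in A's triple loop ====
theorem pcpUnder_mem_inner (k n : String)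
    (bags : List String) (acc : List String) (x : String) :
    x ∈ bags.foldl (fun acc bag => if PySem.Str.isIn n bag then acc ++ [k] else acc) acc ↔
      x ∈ acc ∨ (x = k ∧ ∃ bag ∈ bags, PySem.Str.isIn n bag) := by
  rw [PySem.List.foldl_append_if (fun bag => PySem.Str.isIn n bag) (fun _ => k) bags acc]
  simp
  tauto

theorem pcpUnder_mem_mid (d : PySem.Dict String (List String)) (k : String)
    (nodes : List String) (acc : List String) (x : String) :
    x ∈ nodes.foldl (fun acc n =>
        ((PySem.Dict.get? d k).getD []).foldl (fun acc bag => if PySem.Str.isIn n bag then acc ++ [k] else acc) acc) acc ↔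
      x ∈ acc ∨ (x = k ∧ ∃ n ∈ nodes, pvEdge d n k) := by
  induction nodes generalizing acc with
  | nil => simp
  | cons n nodes ih =>
    rw [List.foldl_cons, ih]
    rw [pcpUnder_mem_inner k n]
    simp only [pvEdge, List.any_eq_true, List.mem_cons, exists_eq_or_imp]
    constructor
    · rintro ((h | ⟨rfl, h⟩) | ⟨rfl, h⟩)
      · exact Or.inl h
      · exact Or.inr ⟨rfl, Or.inl h⟩
      · exact Or.inr ⟨rfl, Or.inr h⟩
    · rintro (h | ⟨rfl, (h | h)⟩)
      · exact Or.inl (Or.inl h)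
      · exact Or.inl (Or.inr ⟨rfl, h⟩)
      · exact Or.inr ⟨rfl, h⟩

theorem pcpUnder_mem_outer (d : PySem.Dict String (List String)) (nodes : List String)
    (keys : List String) (acc : List String) (x : String) :
    x ∈ keys.foldl (fun acc k =>
        nodes.foldl (fun acc n =>
          ((PySem.Dict.get? d k).getD []).foldl (fun acc bag => if PySem.Str.isIn n bag then acc ++ [k] else acc) acc) acc) acc ↔
      x ∈ acc ∨ (x ∈ keys ∧ ∃ n ∈ nodes, pvEdge d n x) := by
  induction keys generalizing acc with
  | nil => simp
  | cons k keys ih =>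
    rw [List.foldl_cons, ih, pcpUnder_mem_mid d k]
    constructor
    · rintro (((h | ⟨rfl, hn⟩) | h)) <;> tauto
    · rintro (h | ⟨hk, hn⟩)
      · tauto
      · rcases List.mem_cons.mp hk with rfl | hk
        · exact Or.inl (Or.inr ⟨rfl, hn⟩)
        · tauto

theorem pcpUnder_toFinset (d : PySem.Dict String (List String)) (nodes : List String) :
    (pcpUnder d nodes).toFinset = pvStepF d nodes.toFinset := by
  ext x
  simp only [List.mem_toFinset, pcpUnder, pvStepF, Finset.mem_biUnion, pvPar, List.mem_filter]
  rw [pcpUnder_mem_outer d nodes (PySem.Dict.keys d) [] x]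
  simp
  tauto

-- ==== graph-layer basics ====
theorem pvStepF_mem (d : PySem.Dict String (List String)) (s : Finset String) (x : String) :
    x ∈ pvStepF d s ↔ ∃ n ∈ s, x ∈ pvPar d n := by
  simp [pvStepF]

theorem pvStepF_mono (d : PySem.Dict String (List String)) {s t : Finset String} (h : s ⊆ t) :
    pvStepF d s ⊆ pvStepF d t := by
  intro x hx
  rw [pvStepF_mem] at hx ⊢
  obtain ⟨n, hn, hp⟩ := hx
  exact ⟨n, h hn, hp⟩

theorem pvStepF_union (d : PySem.Dict String (List String)) (s t : Finset String) :
    pvStepF d (s ∪ t) = pvStepF d s ∪ pvStepF d t := by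
  ext x
  simp only [pvStepF_mem, Finset.mem_union]
  constructor
  · rintro ⟨n, (h | h), hp⟩
    · exact Or.inl ⟨n, h, hp⟩
    · exact Or.inr ⟨n, h, hp⟩
  · rintro (⟨n, h, hp⟩ | ⟨n, h, hp⟩)
    · exact ⟨n, Or.inl h, hp⟩
    · exact ⟨n, Or.inr h, hp⟩

theorem pvStepF_empty (d : PySem.Dict String (List String)) : pvStepF d ∅ = ∅ := by
  simp [pvStepF]

theorem pvPar_subset_keys (d : PySem.Dict String (List String)) (n : String) :
    pvPar d n ⊆ (PySem.Dict.keys d).toFinset := by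
  intro x hx
  simp only [pvPar, List.mem_toFinset, List.mem_filter] at hx
  simp [hx.1]

theorem pvStepF_subset_keys (d : PySem.Dict String (List String)) (s : Finset String) :
    pvStepF d s ⊆ (PySem.Dict.keys d).toFinset := by
  intro x hx
  rw [pvStepF_mem] at hx
  obtain ⟨n, _, hp⟩ := hx
  exact pvPar_subset_keys d n hp

theorem pvAccum_subset_keys (d : PySem.Dict String (List String)) (a : String) (i : Nat) :
    pvAccum d a i ⊆ (PySem.Dict.keys d).toFinset := by
  induction i with
  | zero => simp [pvAccum]
  | succ i ih =>
    simp only [pvAccum]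
    exact Finset.union_subset ih (pvStepF_subset_keys d _)

theorem pvAccum_mono (d : PySem.Dict String (List String)) (a : String) {i j : Nat} (h : i ≤ j) :
    pvAccum d a i ⊆ pvAccum d a j := by
  induction j with
  | zero => simp_all
  | succ j ih =>
    rcases Nat.lt_or_ge i (j+1) with hle | hge
    · exact (ih (by omega)).trans (by simp [pvAccum])
    · have : i = j + 1 := by omega
      subst this; exact Finset.Subset.refl _

theorem pvStepF_accum (d : PySem.Dict String (List String)) (a : String) (i : Nat) :
    pvStepF d (pvAccum d a i) ⊆ pvAccum d a (i+1) := by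
  induction i with
  | zero => simp [pvAccum, pvStepF_empty]
  | succ i ih =>
    show pvStepF d (pvAccum d a i ∪ pvLayer d a (i+1)) ⊆ _
    rw [pvStepF_union]
    apply Finset.union_subset
    · exact ih.trans (pvAccum_mono d a (by omega))
    · intro x hx
      exact Finset.mem_union_right _ hx

theorem pvLayer_empty_ge (d : PySem.Dict String (List String)) (a : String) {i j : Nat}
    (h : pvLayer d a i = ∅) (hij : i ≤ j) : pvLayer d a j = ∅ := by
  induction j with
  | zero =>
    have : i = 0 := by omega
    subst this; exact h
  | succ j ih =>
    rcases Nat.lt_or_ge i (j+1) with hle | hge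
    · have hj := ih (by omega)
      simp [pvLayer, hj, pvStepF_empty]
    · have : i = j + 1 := by omega
      subst this; exact h

theorem pvAccum_stab (d : PySem.Dict String (List String)) (a : String) {i j : Nat}
    (h : pvLayer d a (i+1) = ∅) (hij : i ≤ j) : pvAccum d a j = pvAccum d a i := by
  induction j with
  | zero => have : i = 0 := by omega
            subst this; rfl
  | succ j ih =>
    rcases Nat.lt_or_ge i (j+1) with hle | hge
    · have hj := ih (by omega)
      have : pvLayer d a (j+1) = ∅ := pvLayer_empty_ge d a h (by omega)
      simp [pvAccum, hj, this]
    · have : i = j + 1 := by omega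
      subst this; rfl

theorem pvAccum_mem (d : PySem.Dict String (List String)) (a : String) (i : Nat) (x : String) :
    x ∈ pvAccum d a i ↔ ∃ m, 1 ≤ m ∧ m ≤ i ∧ x ∈ pvLayer d a m := by
  induction i with
  | zero => simp [pvAccum]
  | succ i ih =>
    simp only [pvAccum, Finset.mem_union, ih]
    constructor
    · rintro (⟨m, h1, h2, h3⟩ | h)
      · exact ⟨m, h1, by omega, h3⟩
      · exact ⟨i+1, by omega, by omega, h⟩
    · rintro ⟨m, h1, h2, h3⟩
      rcases Nat.lt_or_ge m (i+1) with hm | hm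
      · exact Or.inl ⟨m, h1, by omega, h3⟩
      · have : m = i + 1 := by omega
        subst this; exact Or.inr h3

-- ==== paths in the parent graph ====
def pvLinked (d : PySem.Dict String (List String)) : String → List String → Prop
  | _, [] => True
  | a, k :: l => k ∈ pvPar d a ∧ pvLinked d k l

theorem pvLinked_append (d : PySem.Dict String (List String)) (u v : List String) (a : String) :
    pvLinked d a (u ++ v) ↔ pvLinked d a u ∧ pvLinked d (u.getLastD a) v := by
  induction u generalizing a with
  | nil => simp [pvLinked]
  | cons k u ih =>
    simp only [List.cons_append, pvLinked, List.getLastD_cons, ih k]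
    tauto

theorem pvLinked_getLastD_singleton (u : List String) (x a : String) :
    (u ++ [x]).getLastD a = x := by simp

theorem pvLinked_mem_keys (d : PySem.Dict String (List String)) :
    ∀ (l : List String) (a : String), pvLinked d a l → ∀ x ∈ l, x ∈ (PySem.Dict.keys d).toFinset := by
  intro l
  induction l with
  | nil => intro a _ x hx; simp at hx
  | cons k l ih =>
    intro a hl x hx
    rcases List.mem_cons.mp hx with rfl | hx
    · exact pvPar_subset_keys d a hl.1
    · exact ih k hl.2 x hx

theorem pvLayer_iff_path (d : PySem.Dict String (List String)) (a : String) :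
    ∀ (i : Nat) (b : String), b ∈ pvLayer d a (i+1) ↔ ∃ l, pvLinked d a (l ++ [b]) ∧ l.length = i := by
  intro i
  induction i with
  | zero =>
    intro b
    show b ∈ pvStepF d {a} ↔ _
    rw [pvStepF_mem]
    constructor
    · rintro ⟨n, hn, hp⟩
      rw [Finset.mem_singleton] at hn
      subst hn
      exact ⟨[], ⟨hp, trivial⟩, rfl⟩
    · rintro ⟨l, hl, hlen⟩
      have : l = [] := List.eq_nil_of_length_eq_zero hlen
      subst this
      exact ⟨a, Finset.mem_singleton_self a, hl.1⟩
  | succ i ih =>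
    intro b
    show b ∈ pvStepF d (pvLayer d a (i+1)) ↔ _
    rw [pvStepF_mem]
    constructor
    · rintro ⟨n, hn, hp⟩
      obtain ⟨l, hl, hlen⟩ := (ih n).mp hn
      refine ⟨l ++ [n], ?_, by simp [hlen]⟩
      rw [pvLinked_append, pvLinked_getLastD_singleton]
      exact ⟨hl, hp, trivial⟩
    · rintro ⟨l, hl, hlen⟩
      rcases List.eq_nil_or_concat l with rfl | ⟨u, n, hun⟩
      · simp at hlen
      · rw [List.concat_eq_append] at hun
        subst hun
        rw [pvLinked_append, pvLinked_getLastD_singleton] at hl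
        refine ⟨n, (ih n).mpr ⟨u, hl.1, by simp at hlen; omega⟩, hl.2.1⟩

theorem pvDupSplit : ∀ (l : List String), ¬ l.Nodup → ∃ l1 x l2 l3, l = l1 ++ x :: l2 ++ x :: l3 := by
  intro l
  induction l with
  | nil => intro h; exact absurd List.nodup_nil h
  | cons k l ih =>
    intro h
    by_cases hk : k ∈ l
    · obtain ⟨l2, l3, rfl⟩ := List.append_of_mem hk
      exact ⟨[], k, l2, l3, rfl⟩
    · have : ¬ l.Nodup := by
        intro hnd
        exact h (List.nodup_cons.mpr ⟨hk, hnd⟩)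
      obtain ⟨l1, x, l2, l3, rfl⟩ := ih this
      exact ⟨k :: l1, x, l2, l3, rfl⟩

-- every nonempty path endpoint is reachable within K steps (K = number of keys)
theorem pvPath_to_accum (d : PySem.Dict String (List String)) :
    ∀ (n : Nat) (a : String) (l : List String) (b : String), l.length ≤ n →
      pvLinked d a (l ++ [b]) → b ∈ pvAccum d a (PySem.Dict.keys d).length := by
  intro n
  induction n with
  | zero =>
    intro a l b hlen hl
    have : l = [] := by
      cases l with
      | nil => rfl
      | cons _ _ => simp at hlen
    subst this
    have hb : b ∈ pvLayer d a 1 := (pvLayer_iff_path d a 0 b).mpr ⟨[], hl, rfl⟩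
    have hkey : b ∈ (PySem.Dict.keys d).toFinset :=
      pvLinked_mem_keys d [b] a hl b (by simp)
    have hK : 1 ≤ (PySem.Dict.keys d).length :=
      List.length_pos_of_mem (List.mem_toFinset.mp hkey)
    exact (pvAccum_mem d a _ b).mpr ⟨1, le_refl 1, hK, hb⟩
  | succ n ih =>
    intro a l b hlen hl
    by_cases hnd : (l ++ [b]).Nodup
    · -- a nodup path has length ≤ K, so b lies in a layer within K
      have hsub : (l ++ [b]).toFinset ⊆ (PySem.Dict.keys d).toFinset := by
        intro x hx
        exact pvLinked_mem_keys d (l ++ [b]) a hl x (List.mem_toFinset.mp hx)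
      have hcard : (l ++ [b]).length ≤ (PySem.Dict.keys d).length := by
        calc (l ++ [b]).length = (l ++ [b]).toFinset.card := (List.toFinset_card_of_nodup hnd).symm
          _ ≤ (PySem.Dict.keys d).toFinset.card := Finset.card_le_card hsub
          _ ≤ (PySem.Dict.keys d).length := List.toFinset_card_le _
      have hb : b ∈ pvLayer d a (l.length + 1) := (pvLayer_iff_path d a l.length b).mpr ⟨l, hl, rfl⟩
      have : (l ++ [b]).length = l.length + 1 := by simp
      exact (pvAccum_mem d a _ b).mpr ⟨l.length + 1, by omega, by omega, hb⟩
    · -- cut a duplicate out and recurse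
      obtain ⟨l1, x, l2, l3, heq⟩ := pvDupSplit (l ++ [b]) hnd
      rcases List.eq_nil_or_concat l3 with rfl | ⟨l3', b', rfl⟩
      · -- duplicate reaches the end: b = x and l1 ++ [b] is a shorter path
        have hb : b = x := by
          have hA : (l ++ [b]).getLast? = some b := by
            exact List.getLast?_concat
          have hB : ((l1 ++ x :: l2) ++ [x]).getLast? = some x := by
            exact List.getLast?_concat
          rw [heq, show l1 ++ x :: l2 ++ [x] = (l1 ++ x :: l2) ++ [x] by simp, hB] at hA
          exact (Option.some.inj hA).symm
        subst hb
        have hl' : pvLinked d a (l1 ++ [b]) := by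
          rw [heq] at hl
          have : l1 ++ b :: l2 ++ [b] = (l1 ++ [b]) ++ (l2 ++ [b]) := by simp
          rw [this, pvLinked_append] at hl
          exact hl.1
        have hlen' : l1.length ≤ n := by
          have := congrArg List.length heq
          simp at this ⊢
          omega
        exact ih a l1 b hlen' hl'
      · -- duplicate strictly inside: splice it out
        rw [List.concat_eq_append] at heq
        have hb : b' = b := by
          have hA : (l ++ [b]).getLast? = some b := by
            exact List.getLast?_concat
          have hB : ((l1 ++ x :: l2 ++ x :: l3') ++ [b']).getLast? = some b' := by
            exact List.getLast?_concat
          rw [heq, show l1 ++ x :: l2 ++ x :: (l3' ++ [b']) = (l1 ++ x :: l2 ++ x :: l3') ++ [b'] by simp, hB] at hA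
          exact Option.some.inj hA
        rw [hb] at heq
        have hsplit : l ++ [b] = (l1 ++ [x]) ++ ((l2 ++ [x]) ++ (l3' ++ [b])) := by
          rw [heq]; simp
        rw [hsplit, pvLinked_append, pvLinked_getLastD_singleton] at hl
        obtain ⟨h1, h23⟩ := hl
        rw [pvLinked_append, pvLinked_getLastD_singleton] at h23
        obtain ⟨_, h3⟩ := h23
        have hl' : pvLinked d a ((l1 ++ x :: l3') ++ [b]) := by
          have : (l1 ++ x :: l3') ++ [b] = (l1 ++ [x]) ++ (l3' ++ [b]) := by simp
          rw [this, pvLinked_append, pvLinked_getLastD_singleton]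
          exact ⟨h1, h3⟩
        have hlen' : (l1 ++ x :: l3').length ≤ n := by
          have := congrArg List.length heq
          simp at this ⊢
          omega
        exact ih a (l1 ++ x :: l3') b hlen' hl'

-- under Pre_ the frontier is empty after K+2 rounds
theorem pvPre_layer_empty (tree : List (String × List String)) (node : String)
    (hpre : Pre_count_parents tree node) :
    pvLayer (PySem.Dict.ofList tree) node ((PySem.Dict.keys (PySem.Dict.ofList tree)).length + 2) = ∅ := by
  set d := PySem.Dict.ofList tree with hd
  set K := (PySem.Dict.keys d).length with hK
  by_contra hne
  obtain ⟨b, hb⟩ := Finset.nonempty_iff_ne_empty.mpr hne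
  have hK1 : K + 2 = (K + 1) + 1 := by omega
  rw [hK1] at hb
  obtain ⟨l, hl, hlen⟩ := (pvLayer_iff_path d node (K+1) b).mp hb
  -- the path l ++ [b] has K+2 elements, all keys, so it has a duplicate
  have hnd : ¬ (l ++ [b]).Nodup := by
    intro hnd
    have hsub : (l ++ [b]).toFinset ⊆ (PySem.Dict.keys d).toFinset := by
      intro x hx
      exact pvLinked_mem_keys d (l ++ [b]) node hl x (List.mem_toFinset.mp hx)
    have : (l ++ [b]).length ≤ K := by
      calc (l ++ [b]).length = (l ++ [b]).toFinset.card := (List.toFinset_card_of_nodup hnd).symm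
        _ ≤ (PySem.Dict.keys d).toFinset.card := Finset.card_le_card hsub
        _ ≤ K := List.toFinset_card_le _
    simp at this
    omega
  obtain ⟨l1, x, l2, l3, heq⟩ := pvDupSplit (l ++ [b]) hnd
  -- x is reachable from node ...
  have hx1 : pvLinked d node (l1 ++ [x]) := by
    rw [heq] at hl
    have : l1 ++ x :: l2 ++ x :: l3 = (l1 ++ [x]) ++ (l2 ++ x :: l3) := by simp
    rw [this, pvLinked_append] at hl
    exact hl.1
  have hxc : pvLinked d x (l2 ++ [x]) := by
    rw [heq] at hl
    have : l1 ++ x :: l2 ++ x :: l3 = (l1 ++ [x]) ++ ((l2 ++ [x]) ++ l3) := by simp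
    rw [this, pvLinked_append, pvLinked_getLastD_singleton] at hl
    have h2 := hl.2
    rw [pvLinked_append] at h2
    exact h2.1
  have hxA : x ∈ pvAccum d node K := pvPath_to_accum d l1.length node l1 x (le_refl _) hx1
  have hxC : x ∈ pvAccum d x K := pvPath_to_accum d l2.length x l2 x (le_refl _) hxc
  exact hpre x hxA hxC

-- ==== A's loop computes the saturated reach set ====
theorem pcpLoopA_eq (d : PySem.Dict String (List String)) (node : String) :
    ∀ (fuel i : Nat) (P X : List String),
      P.toFinset = pvAccum d node i →
      X.toFinset = pvLayer d node (i+1) →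
      fuel + i = (PySem.Dict.keys d).length + 2 →
      pcpLoopA d fuel P X =
        ((pvAccum d node ((PySem.Dict.keys d).length + 2)).card : Int) := by
  intro fuel
  induction fuel with
  | zero =>
    intro i P X hP hX hfuel
    have hi : i = (PySem.Dict.keys d).length + 2 := by omega
    subst hi
    show ((PySem.Set.ofList P).length : Int) = _
    rw [pvSet_ofList_length, hP]
  | succ fuel ih =>
    intro i P X hP hX hfuel
    show pcpLoopA d (fuel+1) P X = _
    rw [pcpLoopA]
    by_cases hX0 : X = []
    · rw [if_pos hX0]
      subst hX0
      have hL : pvLayer d node (i+1) = ∅ := by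
        rw [← hX]; simp
      have hstab : pvAccum d node ((PySem.Dict.keys d).length + 2) = pvAccum d node i :=
        pvAccum_stab d node hL (by omega)
      rw [pvSet_ofList_length, hP, hstab]
    · rw [if_neg hX0]
      apply ih (i+1)
      · rw [pvSet_ofList_toFinset, List.toFinset_append, pvSet_ofList_toFinset, hP, hX]
        rfl
      · rw [pcpUnder_toFinset, pvSet_ofList_toFinset, hX]
        rfl
      · omega

-- ==== B's frontier expansion ====
theorem pcpExpand_keys_spec (d : PySem.Dict String (List String)) (n : String) :
    ∀ (keys : List String) (st : PySem.Set String × List String) (V0 : List String),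
      st.1.Nodup → st.1 = V0 ++ st.2 →
      (keys.foldl (fun st k =>
          if !(PySem.Set.contains st.1 k) && ((PySem.Dict.get? d k).getD []).any (fun bag => PySem.Str.isIn n bag)
          then (PySem.Set.add st.1 k, st.2 ++ [k]) else st) st).1.Nodup ∧
      (keys.foldl (fun st k =>
          if !(PySem.Set.contains st.1 k) && ((PySem.Dict.get? d k).getD []).any (fun bag => PySem.Str.isIn n bag)
          then (PySem.Set.add st.1 k, st.2 ++ [k]) else st) st).1 =
        V0 ++ (keys.foldl (fun st k =>
          if !(PySem.Set.contains st.1 k) && ((PySem.Dict.get? d k).getD []).any (fun bag => PySem.Str.isIn n bag)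
          then (PySem.Set.add st.1 k, st.2 ++ [k]) else st) st).2 ∧
      ∀ x, x ∈ (keys.foldl (fun st k =>
          if !(PySem.Set.contains st.1 k) && ((PySem.Dict.get? d k).getD []).any (fun bag => PySem.Str.isIn n bag)
          then (PySem.Set.add st.1 k, st.2 ++ [k]) else st) st).1 ↔
        x ∈ st.1 ∨ (x ∈ keys ∧ pvEdge d n x) := by
  intro keys
  induction keys with
  | nil =>
    intro st V0 h1 h2
    refine ⟨h1, h2, ?_⟩
    simp
  | cons k keys ih =>
    intro st V0 h1 h2
    rw [List.foldl_cons]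
    by_cases hc : (!(PySem.Set.contains st.1 k) && ((PySem.Dict.get? d k).getD []).any (fun bag => PySem.Str.isIn n bag)) = true
    · rw [if_pos hc]
      have hnm : k ∉ st.1 := by
        rcases Bool.and_eq_true_iff.mp hc with ⟨hnc, _⟩
        rw [Bool.not_eq_true'] at hnc
        intro hmem
        have hct := (PySem.Set.contains_iff st.1 k).mpr hmem
        rw [hnc] at hct
        exact Bool.false_ne_true hct
      have hadd : PySem.Set.add st.1 k = st.1 ++ [k] := by
        simp only [PySem.Set.add]
        rw [if_neg]
        intro hcm
        exact hnm ((PySem.Set.contains_iff st.1 k).mp hcm)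
      have hedge : pvEdge d n k := (Bool.and_eq_true_iff.mp hc).2
      obtain ⟨r1, r2, r3⟩ := ih (PySem.Set.add st.1 k, st.2 ++ [k]) V0
        (by rw [hadd]; exact List.Nodup.append h1 (by simp) (by simpa using fun h => hnm h)
            )
        (by show PySem.Set.add st.1 k = V0 ++ (st.2 ++ [k])
            rw [hadd, h2, List.append_assoc])
      refine ⟨r1, r2, ?_⟩
      intro x
      rw [r3 x]
      show x ∈ PySem.Set.add st.1 k ∨ _ ↔ _
      rw [hadd]
      simp only [List.mem_append, List.mem_cons, List.not_mem_nil, or_false]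
      constructor
      · rintro ((h | rfl) | ⟨hk, he⟩)
        · exact Or.inl h
        · exact Or.inr ⟨Or.inl rfl, hedge⟩
        · exact Or.inr ⟨Or.inr hk, he⟩
      · rintro (h | ⟨(rfl | hk), he⟩)
        · exact Or.inl (Or.inl h)
        · exact Or.inl (Or.inr rfl)
        · exact Or.inr ⟨hk, he⟩
    · rw [if_neg hc]
      obtain ⟨r1, r2, r3⟩ := ih st V0 h1 h2
      refine ⟨r1, r2, ?_⟩
      intro x
      rw [r3 x]
      simp only [List.mem_cons]
      constructor
      · rintro (h | ⟨hk, he⟩)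
        · exact Or.inl h
        · exact Or.inr ⟨Or.inr hk, he⟩
      · rintro (h | ⟨(rfl | hk), he⟩)
        · exact Or.inl h
        · -- k itself: the guard was false, so either k is already in st.1 or there is no edge
          rw [Bool.and_eq_true_iff.not] at hc
          push Not at hc
          by_cases hmem : x ∈ st.1
          · exact Or.inl hmem
          · exfalso
            have hcf : PySem.Set.contains st.1 x = false := by
              cases hcv : PySem.Set.contains st.1 x
              · rfl
              · exact absurd ((PySem.Set.contains_iff st.1 x).mp hcv) hmem
            have he' : (((PySem.Dict.get? d x).getD []).any fun bag => PySem.Str.isIn n bag) = true := by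
              simpa [pvEdge] using he
            exact hc (by rw [hcf]; rfl) he'
        · exact Or.inr ⟨hk, he⟩

theorem pcpExpand_frontier_spec (d : PySem.Dict String (List String)) :
    ∀ (Fr : List String) (st : PySem.Set String × List String) (V0 : List String),
      st.1.Nodup → st.1 = V0 ++ st.2 →
      (Fr.foldl (pcpExpand d (PySem.Dict.keys d)) st).1.Nodup ∧
      (Fr.foldl (pcpExpand d (PySem.Dict.keys d)) st).1 =
        V0 ++ (Fr.foldl (pcpExpand d (PySem.Dict.keys d)) st).2 ∧
      ∀ x, x ∈ (Fr.foldl (pcpExpand d (PySem.Dict.keys d)) st).1 ↔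
        x ∈ st.1 ∨ ∃ n ∈ Fr, x ∈ pvPar d n := by
  intro Fr
  induction Fr with
  | nil =>
    intro st V0 h1 h2
    refine ⟨h1, h2, ?_⟩
    simp
  | cons n Fr ih =>
    intro st V0 h1 h2
    rw [List.foldl_cons]
    obtain ⟨e1, e2, e3⟩ := pcpExpand_keys_spec d n (PySem.Dict.keys d) st V0 h1 h2
    have e1' : (pcpExpand d (PySem.Dict.keys d) st n).1.Nodup := e1
    have e2' : (pcpExpand d (PySem.Dict.keys d) st n).1 = V0 ++ (pcpExpand d (PySem.Dict.keys d) st n).2 := e2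
    have e3' : ∀ x, x ∈ (pcpExpand d (PySem.Dict.keys d) st n).1 ↔
        x ∈ st.1 ∨ (x ∈ PySem.Dict.keys d ∧ pvEdge d n x) := e3
    obtain ⟨r1, r2, r3⟩ := ih (pcpExpand d (PySem.Dict.keys d) st n) V0 e1' e2'
    refine ⟨r1, r2, ?_⟩
    intro x
    rw [r3 x, e3' x]
    simp only [List.mem_cons, pvPar, List.mem_toFinset, List.mem_filter]
    constructor
    · rintro ((h | ⟨hk, he⟩) | ⟨m, hm, hp⟩)
      · exact Or.inl h
      · exact Or.inr ⟨n, Or.inl rfl, hk, he⟩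
      · exact Or.inr ⟨m, Or.inr hm, hp⟩
    · rintro (h | ⟨m, (rfl | hm), hp⟩)
      · exact Or.inl (Or.inl h)
      · exact Or.inl (Or.inr hp)
      · exact Or.inr ⟨m, hm, hp⟩

-- ==== closure gives the whole reach set ====
theorem pvClosure_accum (d : PySem.Dict String (List String)) (node : String) (S : Finset String)
    (hcl : pvStepF d (S ∪ {node}) ⊆ S) : ∀ j, pvAccum d node j ⊆ S := by
  have hlayer : ∀ m, pvLayer d node (m+1) ⊆ S := by
    intro m
    induction m with
    | zero =>
      show pvStepF d {node} ⊆ S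
      exact (pvStepF_mono d (by simp)).trans hcl
    | succ m ih =>
      show pvStepF d (pvLayer d node (m+1)) ⊆ S
      refine (pvStepF_mono d ?_).trans hcl
      exact ih.trans Finset.subset_union_left
  intro j
  induction j with
  | zero => simp [pvAccum]
  | succ j ih =>
    exact Finset.union_subset ih (hlayer j)

-- ==== B's loop computes the saturated reach set ====
theorem pcpLoopB_eq (d : PySem.Dict String (List String)) (node : String)
    (hK2 : pvLayer d node ((PySem.Dict.keys d).length + 2) = ∅) :
    ∀ (fuel : Nat) (V Fr : List String),
      V.Nodup →
      V.toFinset ⊆ pvAccum d node ((PySem.Dict.keys d).length + 2) →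
      Fr.toFinset ⊆ pvAccum d node ((PySem.Dict.keys d).length + 2) ∪ {node} →
      pvStepF d ((V.toFinset ∪ {node}) \ Fr.toFinset) ⊆ V.toFinset →
      (Fr ≠ [] → (PySem.Dict.keys d).length + 1 ≤ fuel + V.length) →
      pcpLoopB d (PySem.Dict.keys d) fuel V Fr =
        ((pvAccum d node ((PySem.Dict.keys d).length + 2)).card : Int) := by
  have hLclosed : pvStepF d (pvAccum d node ((PySem.Dict.keys d).length + 2) ∪ {node}) ⊆
      pvAccum d node ((PySem.Dict.keys d).length + 2) := by
    rw [pvStepF_union]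
    apply Finset.union_subset
    · refine (pvStepF_accum d node _).trans ?_
      have hle : pvLayer d node (((PySem.Dict.keys d).length + 2) + 1) = ∅ :=
        pvLayer_empty_ge d node hK2 (by omega)
      have hstab := pvAccum_stab d node (i := (PySem.Dict.keys d).length + 2)
        (j := (PySem.Dict.keys d).length + 2 + 1) hle (by omega)
      rw [hstab]
    · show pvLayer d node 1 ⊆ _
      refine Finset.Subset.trans ?_
        (pvAccum_mono d node (show 1 ≤ (PySem.Dict.keys d).length + 2 by omega))
      intro x hx
      exact Finset.mem_union_right _ hx
  have hVfin : ∀ V : List String, V.Nodup →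
      V.toFinset ⊆ pvAccum d node ((PySem.Dict.keys d).length + 2) →
      V.length ≤ (PySem.Dict.keys d).length := by
    intro V hnd hsub
    calc V.length = V.toFinset.card := (List.toFinset_card_of_nodup hnd).symm
      _ ≤ ((PySem.Dict.keys d).toFinset).card :=
          Finset.card_le_card (hsub.trans (pvAccum_subset_keys d node _))
      _ ≤ (PySem.Dict.keys d).length := List.toFinset_card_le _
  intro fuel
  induction fuel with
  | zero =>
    intro V Fr hnd hV hFr hcl hfuel
    by_cases hF0 : Fr = []
    · subst hF0
      show ((V.length : Int)) = _
      have hcl' : pvStepF d (V.toFinset ∪ {node}) ⊆ V.toFinset := by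
        simpa using hcl
      have hLV : pvAccum d node ((PySem.Dict.keys d).length + 2) ⊆ V.toFinset :=
        pvClosure_accum d node V.toFinset hcl' _
      have : V.toFinset = pvAccum d node ((PySem.Dict.keys d).length + 2) :=
        Finset.Subset.antisymm hV hLV
      rw [← this, List.toFinset_card_of_nodup hnd]
    · exfalso
      have := hfuel hF0
      have := hVfin V hnd hV
      omega
  | succ fuel ih =>
    intro V Fr hnd hV hFr hcl hfuel
    show pcpLoopB d (PySem.Dict.keys d) (fuel+1) V Fr = _
    rw [pcpLoopB]
    by_cases hF0 : Fr = []
    · rw [if_pos hF0]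
      subst hF0
      have hcl' : pvStepF d (V.toFinset ∪ {node}) ⊆ V.toFinset := by
        simpa using hcl
      have hLV : pvAccum d node ((PySem.Dict.keys d).length + 2) ⊆ V.toFinset :=
        pvClosure_accum d node V.toFinset hcl' _
      have : V.toFinset = pvAccum d node ((PySem.Dict.keys d).length + 2) :=
        Finset.Subset.antisymm hV hLV
      rw [← this, List.toFinset_card_of_nodup hnd]
    · rw [if_neg hF0]
      obtain ⟨r1, r2, r3⟩ := pcpExpand_frontier_spec d Fr (V, []) V hnd (by simp)
      set r := Fr.foldl (pcpExpand d (PySem.Dict.keys d)) (V, []) with hr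
      -- the new visited set is V ∪ step(Fr)
      have hr1fin : r.1.toFinset = V.toFinset ∪ pvStepF d Fr.toFinset := by
        ext x
        simp only [List.mem_toFinset, Finset.mem_union, r3 x, pvStepF_mem]
      have hstepFr : pvStepF d Fr.toFinset ⊆ pvAccum d node ((PySem.Dict.keys d).length + 2) :=
        (pvStepF_mono d hFr).trans hLclosed
      -- new-frontier membership: exactly the new elements
      have hr2mem : ∀ x, x ∈ r.2 ↔ x ∈ r.1 ∧ x ∉ V := by
        intro x
        constructor
        · intro hx
          refine ⟨by rw [r2]; exact List.mem_append_right _ hx, ?_⟩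
          intro hxV
          have : ¬ r.1.Nodup := by
            rw [r2]
            intro hnd2
            exact (List.disjoint_of_nodup_append hnd2) hxV hx
          exact this r1
        · rintro ⟨hx1, hxV⟩
          rw [r2] at hx1
          rcases List.mem_append.mp hx1 with h | h
          · exact absurd h hxV
          · exact h
      apply ih r.1 r.2
      · exact r1
      · rw [hr1fin]
        exact Finset.union_subset hV hstepFr
      · intro x hx
        have := (hr2mem x).mp (List.mem_toFinset.mp hx)
        have hx1 : x ∈ r.1.toFinset := List.mem_toFinset.mpr this.1
        rw [hr1fin] at hx1
        rcases Finset.mem_union.mp hx1 with h | h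
        · exact absurd (List.mem_toFinset.mp h) this.2
        · exact Finset.mem_union_left _ (hstepFr h)
      · -- closure is preserved
        intro x hx
        rw [hr1fin]
        -- (r1 ∪ {node}) \ r2 ⊆ (V ∪ {node}), so step of it lands in V ∪ step Fr
        have hsub : (r.1.toFinset ∪ {node}) \ r.2.toFinset ⊆ (V.toFinset ∪ {node}) := by
          intro y hy
          rw [Finset.mem_sdiff] at hy
          obtain ⟨hy1, hy2⟩ := hy
          rcases Finset.mem_union.mp hy1 with h | h
          · by_cases hyV : y ∈ V
            · exact Finset.mem_union_left _ (List.mem_toFinset.mpr hyV)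
            · exfalso
              exact hy2 (List.mem_toFinset.mpr ((hr2mem y).mpr ⟨List.mem_toFinset.mp h, hyV⟩))
          · exact Finset.mem_union_right _ h
        have hstep1 : pvStepF d ((r.1.toFinset ∪ {node}) \ r.2.toFinset) ⊆
            pvStepF d (V.toFinset ∪ {node}) := pvStepF_mono d hsub
        have hVsplit : (V.toFinset ∪ {node} : Finset String) ⊆
            ((V.toFinset ∪ {node}) \ Fr.toFinset) ∪ Fr.toFinset := by
          intro y hy
          by_cases hyF : y ∈ Fr.toFinset
          · exact Finset.mem_union_right _ hyF
          · exact Finset.mem_union_left _ (Finset.mem_sdiff.mpr ⟨hy, hyF⟩)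
        have hstep2 : pvStepF d (V.toFinset ∪ {node}) ⊆ V.toFinset ∪ pvStepF d Fr.toFinset := by
          refine (pvStepF_mono d hVsplit).trans ?_
          rw [pvStepF_union]
          exact Finset.union_subset (hcl.trans Finset.subset_union_left) Finset.subset_union_right
        exact hstep2 (hstep1 hx)
      · -- fuel bookkeeping
        intro hr2ne
        have hlen : r.1.length = V.length + r.2.length := by
          rw [r2, List.length_append]
        have : 1 ≤ r.2.length := by
          cases hr2 : r.2 with
          | nil => exact absurd hr2 hr2ne
          | cons _ _ => simp
        have := hfuel hF0
        omega

-- ===== VERDICT (by name: the statement is the Claim_ definition above) =====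
theorem count_parents_spec : Claim_equal_count_parents := by
  intro tree node _hdom hpre
  unfold Spec_count_parents
  have hK2 := pvPre_layer_empty tree node hpre
  have hP0 : ([] : List String).toFinset = pvAccum (PySem.Dict.ofList tree) node 0 := by
    simp [pvAccum]
  have hX0 : (pcpUnder (PySem.Dict.ofList tree) [node]).toFinset =
      pvLayer (PySem.Dict.ofList tree) node 1 := by
    rw [pcpUnder_toFinset]
    show pvStepF (PySem.Dict.ofList tree) [node].toFinset = pvStepF (PySem.Dict.ofList tree) {node}
    congr 1
  have hA := pcpLoopA_eq (PySem.Dict.ofList tree) node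
    ((PySem.Dict.keys (PySem.Dict.ofList tree)).length + 2) 0 [] (pcpUnder (PySem.Dict.ofList tree) [node])
    hP0 hX0 (by omega)
  have hcl0 : pvStepF (PySem.Dict.ofList tree)
      ((([] : List String).toFinset ∪ {node}) \ ([node] : List String).toFinset) ⊆
      ([] : List String).toFinset := by
    have he : ((([] : List String).toFinset ∪ {node}) \ ([node] : List String).toFinset : Finset String) = ∅ := by
      simp
    rw [he, pvStepF_empty]
    exact Finset.empty_subset _
  have hB := pcpLoopB_eq (PySem.Dict.ofList tree) node hK2
    ((PySem.Dict.keys (PySem.Dict.ofList tree)).length + 2) [] [node]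
    List.nodup_nil (by simp) (by simp) hcl0 (fun _ => by simp)
  show count_parents tree node = count_parents_alt tree node
  exact hA.trans hB.symm
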